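-- pv_equiv track=rewrite | github.com/Farmer-from-Space/coding_test | double priority queue.py | solution
-- ===== SOURCE A (Python) =====
-- import heapq
-- import heapq
--
-- def solution(operations):
--     queue = []
--     answer = []
--     for i in range(len(operations)):
--         if operations[i].startswith('I'):
--             heapq.heappush(queue, int(operations[i][2:]))
--         elif operations[i].startswith('D 1'):
--             if queue:
--                 heapq._heapify_max(queue)
--                 heapq._heappop_max(queue)
--         elif operations[i].startswith('D -1'):
--             if queue:
--                 heapq.heapify(queue)
--                 heapq.heappop(queue)
--
--     if queue:
--         heapq._heapify_max(queue)
--         answer.append(heapq._heappop_max(queue))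
--         heapq.heapify(queue)
--         answer.append(heapq.heappop(queue))
--     else:
--         answer = [0,0]
--
--     return answer
-- ===== SOURCE B (Python) =====
-- import bisect
--
-- def solution(operations):
--     arr = []  # sorted multiset
--     for op in operations:
--         if op.startswith('I'):
--             bisect.insort(arr, int(op[2:]))
--         elif op.startswith('D 1'):
--             if arr:
--                 arr.pop()          # delete max = last element
--         elif op.startswith('D -1'):
--             if arr:
--                 del arr[0]         # delete min = first element
--     return [arr[-1], arr[0]] if arr else [0, 0]
-- ===== Notes on version B (the rewrite author's own statement) =====
-- stated objective: alternative
-- what changed: Replaces A's binary heap that is fully re-heapified before every delete-max/min with one sorted list maintained by bisect.insort, so deletes and the final [max, min] are reads/pops at the two ends.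
-- outside the precondition, e.g. on solution(['I 7']): A raises IndexError, B returns [7, 7]
-- crash fix: On inputs whose operations leave exactly one element x in the queue, A raises IndexError (it pops the min from the heap already emptied by the max-pop); B returns [x, x]. — e.g. on solution(["I 7"]): A raises IndexError, B returns [7, 7]
import Mathlib
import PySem

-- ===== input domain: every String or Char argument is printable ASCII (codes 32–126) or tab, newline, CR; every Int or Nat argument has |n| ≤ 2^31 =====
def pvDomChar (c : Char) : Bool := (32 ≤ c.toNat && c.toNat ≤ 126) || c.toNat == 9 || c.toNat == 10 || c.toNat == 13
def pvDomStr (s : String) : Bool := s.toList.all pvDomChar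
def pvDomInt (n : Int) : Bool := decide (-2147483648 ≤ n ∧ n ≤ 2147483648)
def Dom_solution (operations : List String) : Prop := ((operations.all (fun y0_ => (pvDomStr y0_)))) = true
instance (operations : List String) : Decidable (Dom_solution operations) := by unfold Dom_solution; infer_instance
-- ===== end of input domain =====

-- B keeps one sorted list (bisect.insort; delete/read at the two ends) instead of A's
-- heap with full re-heapifications before every delete: a different data structure.
-- A's heapq library calls are ported by their documented effect on the heap's contents
-- (push adds the element; heapify+pop removes one occurrence of the min/max): only the
-- final two popped values are observable, and they depend only on the multiset.

-- int(op[2:]) — shared by both Pythons; none (ValueError) is excluded by Pre_solution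
def pvParse (op : String) : Int := (PySem.Int.ofChars? (op.toList.drop 2)).getD 0

-- ===== PORT A =====
-- one iteration of A's for-loop over operations[i]
def pvStepA (q : List Int) (op : String) : List Int :=
  if PySem.Str.startswith op "I" then
    pvParse op :: q                          -- heapq.heappush: adds int(op[2:]) to the heap
  else if PySem.Str.startswith op "D 1" then
    if q = [] then q else q.erase ((PySem.List.max? q (fun x => x)).getD 0)   -- _heapify_max; _heappop_max: removes one max
  else if PySem.Str.startswith op "D -1" then
    if q = [] then q else q.erase ((PySem.List.min? q (fun x => x)).getD 0)   -- heapify; heappop: removes one min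
  else q

-- the final 'if queue: ... else answer = [0,0]' block of A
def pvFinishA (q : List Int) : List Int :=
  if q = [] then [0, 0]
  else
    let m := (PySem.List.max? q (fun x => x)).getD 0   -- _heapify_max; _heappop_max
    [m, ((PySem.List.min? (q.erase m) (fun x => x)).getD 0)]

def solution (operations : List String) : List Int :=
  pvFinishA (operations.foldl pvStepA [])         -- heapify; heappop (raises if q had 1 element: outside Pre_)

-- ===== PORT B =====
-- one iteration of B's for-loop; bisect.insort on a sorted Int list produces List.orderedInsert (≤)
def pvStepB (arr : List Int) (op : String) : List Int :=
  if PySem.Str.startswith op "I" then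
    List.orderedInsert (· ≤ ·) (pvParse op) arr
  else if PySem.Str.startswith op "D 1" then
    if arr = [] then arr else arr.dropLast   -- arr.pop()
  else if PySem.Str.startswith op "D -1" then
    if arr = [] then arr else arr.tail       -- del arr[0]
  else arr

-- B's final 'return [arr[-1], arr[0]] if arr else [0, 0]'
def pvFinishB (arr : List Int) : List Int :=
  if arr = [] then [0, 0]
  else [(arr.getLast?).getD 0, (arr.head?).getD 0]   -- [arr[-1], arr[0]]

def solution_alt (operations : List String) : List Int :=
  pvFinishB (operations.foldl pvStepB [])

-- ===== PRECONDITION & SPEC =====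
-- running size of the queue (Nat subtraction encodes the 'if queue:' guards)
def pvSizeStep (s : Nat) (op : String) : Nat :=
  if PySem.Str.startswith op "I" then s + 1
  else if PySem.Str.startswith op "D 1" then s - 1
  else if PySem.Str.startswith op "D -1" then s - 1
  else s

-- Pre_ excludes exactly the inputs where Python A raises: an 'I' payload int() rejects
-- (ValueError), and a final queue of exactly one element (A pops the min from an empty
-- heap after popping the max: IndexError).
def Pre_solution (operations : List String) : Prop :=
  (operations.foldl pvSizeStep 0 ≠ 1) ∧
  (∀ op ∈ operations, PySem.Str.startswith op "I" = true →
      (PySem.Int.ofChars? (op.toList.drop 2)).isSome = true)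
instance (operations : List String) : Decidable (Pre_solution operations) := by
  unfold Pre_solution; infer_instance

def pvWitness_solution : List String := ["I 3", "I 5", "D 1", "I -2"]

-- On inputs whose final queue holds exactly one element x (and every 'I' payload parses),
-- A raises IndexError popping the min from the emptied heap; B returns [x, x].
def Raises_solution (operations : List String) : Prop :=
  (operations.foldl pvSizeStep 0 = 1) ∧
  (∀ op ∈ operations, PySem.Str.startswith op "I" = true →
      (PySem.Int.ofChars? (op.toList.drop 2)).isSome = true)
instance (operations : List String) : Decidable (Raises_solution operations) := by
  unfold Raises_solution; infer_instance
def pvRaiseWitness_solution : List String := ["I 7"]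
def pvRaiseWitnessOut_solution : List Int := [7, 7]

def Spec_solution (operations : List String) (out : List Int) : Prop := out = solution_alt operations
instance (operations : List String) (out : List Int) : Decidable (Spec_solution operations out) := by unfold Spec_solution; infer_instance

-- ===== CLAIM (what is proved, stated in full; the proofs are below) =====
def Claim_equal_solution : Prop := ∀ (operations : List String), Dom_solution operations → Pre_solution operations → Spec_solution operations (solution operations)
def Claim_raises_solution : Prop := (∀ (operations : List String), Dom_solution operations → Raises_solution operations → ¬ Pre_solution operations) ∧ (Dom_solution (pvRaiseWitness_solution) ∧ Raises_solution (pvRaiseWitness_solution) ∧ solution_alt (pvRaiseWitness_solution) = pvRaiseWitnessOut_solution)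

-- ===== LEMMAS AND PROOFS =====

-- loop invariant: A's heap is a permutation of B's list, and B's list is sorted
def pvInv (q arr : List Int) : Prop := q.Perm arr ∧ arr.Pairwise (· ≤ ·)

theorem pv_sorted_le_getLast (x : Int) (xs : List Int) (h : (x :: xs).Pairwise (· ≤ ·)) :
    ∀ y ∈ x :: xs, y ≤ (x :: xs).getLast (by simp) := by
  induction xs generalizing x with
  | nil => intro y hy; simp at hy; simp [hy]
  | cons b t ih =>
    intro y hy
    rw [List.getLast_cons (by simp)]
    rcases List.mem_cons.mp hy with rfl | hy'
    · exact le_trans (List.rel_of_pairwise_cons h (by simp))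
        (ih b h.tail b (by simp))
    · exact ih b h.tail y hy'

theorem pv_max?_sorted (arr : List Int) (h : arr.Pairwise (· ≤ ·)) (hne : arr ≠ []) :
    PySem.List.max? arr (fun x => x) = some (arr.getLast hne) := by
  obtain ⟨x, xs, rfl⟩ := List.exists_cons_of_ne_nil hne
  cases hm : PySem.List.max? (x :: xs) (fun x => x) with
  | none => exact absurd ((PySem.List.max?_eq_none_iff _ _).mp hm) hne
  | some m =>
    have hmem := PySem.List.max?_mem hm
    have hmax := PySem.List.max?_isMax hm
    have h1 : m ≤ (x :: xs).getLast hne := pv_sorted_le_getLast x xs h m hmem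
    have h2 : (x :: xs).getLast hne ≤ m := hmax _ (List.getLast_mem hne)
    rw [le_antisymm h1 h2]

theorem pv_min?_sorted (x : Int) (xs : List Int) (h : (x :: xs).Pairwise (· ≤ ·)) :
    PySem.List.min? (x :: xs) (fun y => y) = some x := by
  cases hm : PySem.List.min? (x :: xs) (fun y => y) with
  | none => exact absurd ((PySem.List.min?_eq_none_iff _ _).mp hm) (by simp)
  | some m =>
    have hmem := PySem.List.min?_mem hm
    have hmin := PySem.List.min?_isMin hm
    have h1 : x ≤ m := by
      rcases List.mem_cons.mp hmem with rfl | hm'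
      · exact le_rfl
      · exact List.rel_of_pairwise_cons h hm'
    have h2 : m ≤ x := hmin x (by simp)
    rw [le_antisymm h2 h1]

theorem pv_perm_max? (q arr : List Int) (h : q.Perm arr) :
    PySem.List.max? q (fun x => x) = PySem.List.max? arr (fun x => x) := by
  cases hq : PySem.List.max? q (fun x => x) with
  | none =>
    have hq' : q = [] := (PySem.List.max?_eq_none_iff _ _).mp hq
    have : arr = [] := List.length_eq_zero_iff.mp (by simpa [hq'] using h.length_eq.symm)
    subst this; subst hq'; rfl
  | some m =>
    cases ha : PySem.List.max? arr (fun x => x) with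
    | none =>
      have ha' : arr = [] := (PySem.List.max?_eq_none_iff _ _).mp ha
      have : q = [] := List.length_eq_zero_iff.mp (by simpa [ha'] using h.length_eq)
      rw [this] at hq; simp [PySem.List.max?] at hq
    | some m' =>
      have h1 : m ≤ m' := PySem.List.max?_isMax ha m (h.mem_iff.mp (PySem.List.max?_mem hq))
      have h2 : m' ≤ m := PySem.List.max?_isMax hq m' (h.mem_iff.mpr (PySem.List.max?_mem ha))
      rw [le_antisymm h1 h2]

theorem pv_perm_min? (q arr : List Int) (h : q.Perm arr) :
    PySem.List.min? q (fun x => x) = PySem.List.min? arr (fun x => x) := by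
  cases hq : PySem.List.min? q (fun x => x) with
  | none =>
    have hq' : q = [] := (PySem.List.min?_eq_none_iff _ _).mp hq
    have : arr = [] := List.length_eq_zero_iff.mp (by simpa [hq'] using h.length_eq.symm)
    subst this; subst hq'; rfl
  | some m =>
    cases ha : PySem.List.min? arr (fun y => y) with
    | none =>
      have ha' : arr = [] := (PySem.List.min?_eq_none_iff _ _).mp ha
      have : q = [] := List.length_eq_zero_iff.mp (by simpa [ha'] using h.length_eq)
      rw [this] at hq; simp [PySem.List.min?] at hq
    | some m' =>
      have h1 : m ≤ m' := PySem.List.min?_isMin hq m' (h.mem_iff.mpr (PySem.List.min?_mem ha))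
      have h2 : m' ≤ m := PySem.List.min?_isMin ha m (h.mem_iff.mp (PySem.List.min?_mem hq))
      rw [le_antisymm h2 h1]

-- erasing one occurrence of the last element is, as a multiset, dropping the last element
theorem pv_erase_last_perm (l : List Int) (m : Int) (hne : l ≠ []) (hm : l.getLast hne = m) :
    (l.erase m).Perm l.dropLast := by
  induction l with
  | nil => cases hne rfl
  | cons x xs ih =>
    cases hxs : xs with
    | nil =>
      subst hxs
      simp at hm
      simp [hm, List.erase_cons_head]
    | cons b t =>
      subst hxs
      rw [List.getLast_cons (by simp)] at hm
      by_cases hxm : x = m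
      · subst hxm
        rw [List.erase_cons_head, List.dropLast_cons₂]
        conv_lhs => rw [← List.dropLast_append_getLast (show (b :: t : List Int) ≠ [] by simp), hm]
        exact List.perm_append_singleton x _
      · rw [List.erase_cons_tail (by simpa using hxm), List.dropLast_cons₂]
        exact (ih (by simp) hm).cons x

theorem pv_inv_step (q arr : List Int) (op : String) (h : pvInv q arr) :
    pvInv (pvStepA q op) (pvStepB arr op) := by
  obtain ⟨hp, hs⟩ := h
  have hnil : q = [] ↔ arr = [] := by
    constructor <;> intro h' <;> subst h'
    · exact List.length_eq_zero_iff.mp (by simpa using hp.length_eq.symm)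
    · exact List.length_eq_zero_iff.mp (by simpa using hp.length_eq)
  unfold pvStepA pvStepB
  by_cases h1 : PySem.Str.startswith op "I" = true
  · rw [if_pos h1, if_pos h1]
    exact ⟨(hp.cons _).trans (List.perm_orderedInsert _ _ arr).symm,
           List.Pairwise.orderedInsert _ arr hs⟩
  rw [if_neg h1, if_neg h1]
  by_cases h2 : PySem.Str.startswith op "D 1" = true
  · rw [if_pos h2, if_pos h2]
    by_cases hq : q = []
    · rw [if_pos hq, if_pos (hnil.mp hq)]; exact ⟨hp, hs⟩
    · have ha : arr ≠ [] := fun h' => hq (hnil.mpr h')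
      rw [if_neg hq, if_neg ha,
        (pv_perm_max? q arr hp).trans (pv_max?_sorted arr hs ha)]
      exact ⟨(hp.erase _).trans (pv_erase_last_perm arr _ ha rfl),
             hs.sublist arr.dropLast_sublist⟩
  rw [if_neg h2, if_neg h2]
  by_cases h3 : PySem.Str.startswith op "D -1" = true
  · rw [if_pos h3, if_pos h3]
    by_cases hq : q = []
    · rw [if_pos hq, if_pos (hnil.mp hq)]; exact ⟨hp, hs⟩
    · have ha : arr ≠ [] := fun h' => hq (hnil.mpr h')
      obtain ⟨x, xs, rfl⟩ := List.exists_cons_of_ne_nil ha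
      rw [if_neg hq, if_neg ha,
        (pv_perm_min? q _ hp).trans (pv_min?_sorted x xs hs)]
      exact ⟨by simpa using hp.erase x, hs.tail⟩
  rw [if_neg h3, if_neg h3]
  exact ⟨hp, hs⟩

theorem pv_inv_fold (ops : List String) :
    pvInv (ops.foldl pvStepA []) (ops.foldl pvStepB []) := by
  have key : ∀ q arr, pvInv q arr → pvInv (ops.foldl pvStepA q) (ops.foldl pvStepB arr) := by
    induction ops with
    | nil => exact fun q arr h => h
    | cons op rest ih => exact fun q arr h => ih _ _ (pv_inv_step q arr op h)
  exact key [] [] ⟨List.Perm.refl [], List.Pairwise.nil⟩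

theorem pv_size_fold (ops : List String) (arr : List Int) :
    (ops.foldl pvStepB arr).length = ops.foldl pvSizeStep arr.length := by
  induction ops generalizing arr with
  | nil => rfl
  | cons op rest ih =>
    simp only [List.foldl_cons]
    rw [ih]
    congr 1
    unfold pvStepB pvSizeStep
    split_ifs with h1 h2 h3 h4 <;> simp_all [List.orderedInsert_length, List.length_dropLast,
      List.length_tail]

theorem pv_finish (q arr : List Int) (h : pvInv q arr) (hlen : arr.length ≠ 1) :
    pvFinishA q = pvFinishB arr := by
  obtain ⟨hp, hs⟩ := h
  unfold pvFinishA pvFinishB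
  by_cases ha : arr = []
  · have hq : q = [] := List.length_eq_zero_iff.mp (by simpa [ha] using hp.length_eq)
    rw [if_pos hq, if_pos ha]
  · have hq : q ≠ [] := fun h' =>
      ha (List.length_eq_zero_iff.mp (by simpa [h'] using hp.length_eq.symm))
    have hlen2 : 2 ≤ arr.length := by
      have h0 : arr.length ≠ 0 := fun h' => ha (List.length_eq_zero_iff.mp h')
      omega
    obtain ⟨x, xs, rfl⟩ := List.exists_cons_of_ne_nil ha
    have hxs : xs ≠ [] := by
      intro h'; rw [h'] at hlen2; simp at hlen2
    rw [if_neg hq, if_neg ha]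
    have hmax : PySem.List.max? q (fun x => x) = some ((x :: xs).getLast ha) :=
      (pv_perm_max? q _ hp).trans (pv_max?_sorted _ hs ha)
    have hperase : (q.erase ((x :: xs).getLast ha)).Perm (x :: xs).dropLast :=
      (hp.erase _).trans (pv_erase_last_perm _ _ ha rfl)
    have hdl : (x :: xs).dropLast = x :: xs.dropLast := by
      obtain ⟨b, t, rfl⟩ := List.exists_cons_of_ne_nil hxs
      exact List.dropLast_cons₂ ..
    have hmin : PySem.List.min? (q.erase ((x :: xs).getLast ha)) (fun y => y) = some x := by
      rw [pv_perm_min? _ _ hperase, hdl]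
      exact pv_min?_sorted x xs.dropLast (hdl ▸ hs.sublist (x :: xs).dropLast_sublist)
    rw [hmax]
    simp only [Option.getD_some]
    rw [hmin]
    simp [List.getLast?_eq_getLast]

-- ===== VERDICT (by name: the statement is the Claim_ definition above) =====
theorem solution_spec : Claim_equal_solution := by
  intro ops _ hpre
  unfold Spec_solution solution solution_alt
  exact pv_finish _ _ (pv_inv_fold ops) (by rw [pv_size_fold ops []]; exact hpre.1)

theorem solution_raises : Claim_raises_solution := by
  unfold Claim_raises_solution
  refine ⟨fun ops _ hr hp => hp.1 hr.1, by decide⟩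

-- self-check: the raise-witness value really is what B returns (uses solution_raises)
theorem pv_raise_witness_ok :
    solution_alt pvRaiseWitness_solution = pvRaiseWitnessOut_solution :=
  solution_raises.2.2.2
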